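-- pv_equiv track=rewrite | github.com/sampdubs/project-euler-solutions | 54.py | hand_to_tup
-- ===== SOURCE A (Python) =====
-- def hand_to_tup(hand):
--     nums = {}
--     ntos = {}
--     stoint = {
--         '2': 2,
--         '3': 3,
--         '4': 4,
--         '5': 5,
--         '6': 6,
--         '7': 7,
--         '8': 8,
--         '9': 9,
--         'T': 10,
--         'J': 11,
--         'Q': 12,
--         'K': 13,
--         'A': 14
--     }
--     hand = hand.split(' ')
--     suitset = set()
--     for card in hand:
--         num = stoint[card[0]]
--         suit = card[1]
--         if num in nums:
--             nums[num] += 1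
--             ntos[num].append(suit)
--         else:
--             nums[num] = 1
--             ntos[num] = [suit]
--         suitset.add(suit)
--     numset = set(nums)
--     if len(suitset) == 1:
--         if numset == {10, 11, 12, 13, 14}:
--             return (9,)
--         mxn = max(numset)
--         stdn = sorted(numset)
--         if len(numset) == 5 and stdn == list(range(min(numset), mxn + 1)):
--             return (8, mxn)
--         return (5,) + tuple(stdn[::-1])
--     lnns = len(numset)
--     if lnns == 2:
--         if set(nums.values()) == {1, 4}:
--             for num, count in nums.items():
--                 if count == 4: fourKind = num
--                 else: oneKind = num
--             return (7, fourKind, oneKind)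
--         else:
--             for num, count in nums.items():
--                 if count == 3: threeKind = num
--                 else: twoKind = num
--             return (6, threeKind, twoKind)
--     elif lnns == 3:
--         if set(nums.values()) == {1, 1, 3}:
--             others = []
--             for num, count in nums.items():
--                 if count == 3: threeKind = num
--                 else: others.append(num)
--             return (3, threeKind, max(others), min(others))
--         else:
--             twoKinds = []
--             for num, count in nums.items():
--                 if count == 2: twoKinds.append(num)
--                 else: oneKind = num
--             return (2, max(twoKinds), min(twoKinds), oneKind)
--     elif lnns == 4:
--         others = []
--         for num, count in nums.items():
--             if count == 2: twoKind = num
--             else: others.append(num)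
--         return (1, twoKind) + tuple(sorted(others)[::-1])
--     else:
--         stdn = sorted(numset)
--         if stdn == list(range(min(numset), max(numset) + 1)):
--             return (4,) + tuple(stdn[::-1])
--         else:
--             return (0,) + tuple(stdn[::-1])
-- ===== SOURCE B (Python) =====
-- RANK_ORDER = list('..23456789TJQKA')  # rank char's position is its value (2..14)
--
--
-- def _groups(ranks):
--     """Run-count groups in first-occurrence order: [(rank, count), ...]."""
--     if not ranks:
--         return []
--     r = ranks[0]
--     same = [x for x in ranks if x == r]
--     rest = [x for x in ranks if x != r]
--     return [(r, len(same))] + _groups(rest)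
--
--
-- def hand_to_tup(hand):
--     cards = hand.split(' ')
--     ranks = sorted((RANK_ORDER.index(c[0]) for c in cards), reverse=True)
--     suits = [c[1] for c in cards]
--     groups = _groups(ranks)
--     distinct = [r for r, _ in groups]  # descending distinct ranks
--     if all(s == suits[0] for s in suits):
--         if distinct == [14, 13, 12, 11, 10]:
--             return (9,)
--         if len(distinct) == 5 and distinct[0] - distinct[4] == 4:
--             return (8, distinct[0])
--         return (5,) + tuple(distinct)
--     # order groups by count then rank, both descending (ranks are < 15)
--     gs = sorted(groups, key=lambda g: g[1] * 15 + g[0], reverse=True)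
--     counts = [c for _, c in gs]
--     if counts == [1, 1, 1, 1, 1]:
--         if distinct[0] - distinct[4] == 4:
--             return (4,) + tuple(distinct)
--         return (0,) + tuple(distinct)
--     ranks_out = tuple(r for r, _ in gs)
--     if counts == [4, 1]:
--         return (7,) + ranks_out
--     if counts == [3, 2]:
--         return (6,) + ranks_out
--     if counts == [3, 1, 1]:
--         return (3,) + ranks_out
--     if counts == [2, 2, 1]:
--         return (2,) + ranks_out
--     if counts == [2, 1, 1, 1]:
--         return (1,) + ranks_out
--     raise ValueError('not a five-card hand')
-- ===== Notes on version B (the rewrite author's own statement) =====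
-- stated objective: alternative
-- what changed: B replaces A's rank-to-count dictionary and the per-category accumulator loops over dict items by a sort-then-scan pipeline: sort the ranks descending, run-length-encode them recursively into (rank,count) groups, sort the groups by (count,rank) descending, and read each category's result tuple directly off that ordered group list.
-- outside the precondition, e.g. on hand_to_tup('2H 2S 3H 4H'): A returns (2, 2, 2, 4), B raises ValueError; on hand_to_tup('2H 2S 2D 2C 2J'): A returns (4, 2), B raises ValueError
import Mathlib
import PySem

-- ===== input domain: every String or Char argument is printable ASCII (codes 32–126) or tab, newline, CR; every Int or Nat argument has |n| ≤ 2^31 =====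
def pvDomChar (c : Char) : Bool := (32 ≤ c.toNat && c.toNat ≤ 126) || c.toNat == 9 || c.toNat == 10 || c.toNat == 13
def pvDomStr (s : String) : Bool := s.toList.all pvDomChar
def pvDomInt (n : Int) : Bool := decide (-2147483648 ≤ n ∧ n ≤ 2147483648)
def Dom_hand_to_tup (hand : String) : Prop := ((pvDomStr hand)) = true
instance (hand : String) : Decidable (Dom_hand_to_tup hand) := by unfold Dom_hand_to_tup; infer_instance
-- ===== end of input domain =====

-- B replaces A's rank->count dictionary and per-category accumulator loops by a
-- sort-then-scan pipeline: sort ranks descending, run-length-encode them into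
-- (rank, count) groups, sort the groups by (count, rank) descending and read each
-- category's tuple directly off that list (objective: alternative).

-- ===== PORT A =====
-- the 'stoint' dict literal of A
def pvStoint : PySem.Dict Char Int :=
  PySem.Dict.ofList [('2',2),('3',3),('4',4),('5',5),('6',6),('7',7),('8',8),('9',9),
                     ('T',10),('J',11),('Q',12),('K',13),('A',14)]

-- A's 'for card in hand' loop: builds nums, ntos, suitset; none = KeyError/IndexError
def pvLoopA : List (List Char) → PySem.Dict Int Int → PySem.Dict Int (List Char) →
    PySem.Set Char → Option (PySem.Dict Int Int × PySem.Dict Int (List Char) × PySem.Set Char)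
  | [], nums, ntos, ss => some (nums, ntos, ss)
  | card :: rest, nums, ntos, ss =>
    match PySem.List.pyGet? card 0 with
    | none => none
    | some c0 =>
      match pvStoint.get? c0 with
      | none => none
      | some num =>
        match PySem.List.pyGet? card 1 with
        | none => none
        | some suit =>
          if nums.contains num then
            pvLoopA rest (nums.modify num 0 (· + 1)) (ntos.modify num [] (· ++ [suit]))
              (PySem.Set.add ss suit)
          else
            pvLoopA rest (nums.insert num 1) (ntos.insert num [suit]) (PySem.Set.add ss suit)

-- everything after A's loop (nums and suitset are built); [] marks inputs where A raises
def pvFinishA (nums : PySem.Dict Int Int) (suitset : PySem.Set Char) : List Int :=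
  let numset : PySem.Set Int := PySem.Set.ofList nums.keys
  if PySem.Set.len suitset == 1 then
    if PySem.Set.equal numset (PySem.Set.ofList [10,11,12,13,14]) then [9]
    else
      match PySem.List.max? numset (fun x => x), PySem.List.min? numset (fun x => x) with
      | some mxn, some mn =>
        let stdn := PySem.List.sorted numset (fun x => x)
        if PySem.Set.len numset == 5 && stdn == PySem.List.pyRange mn (mxn + 1) 1 then
          [8, mxn]
        else 5 :: (PySem.List.slice? stdn none none (-1)).getD []
      | _, _ => []
  else
    let lnns := PySem.Set.len numset
    if lnns == 2 then
      if PySem.Set.equal (PySem.Set.ofList nums.values) (PySem.Set.ofList [1,4]) then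
        let st := nums.items.foldl
          (fun (p : Option Int × Option Int) it =>
            if it.2 == 4 then (some it.1, p.2) else (p.1, some it.1)) (none, none)
        match st.1, st.2 with
        | some fourKind, some oneKind => [7, fourKind, oneKind]
        | _, _ => []
      else
        let st := nums.items.foldl
          (fun (p : Option Int × Option Int) it =>
            if it.2 == 3 then (some it.1, p.2) else (p.1, some it.1)) (none, none)
        match st.1, st.2 with
        | some threeKind, some twoKind => [6, threeKind, twoKind]
        | _, _ => []
    else if lnns == 3 then
      if PySem.Set.equal (PySem.Set.ofList nums.values) (PySem.Set.ofList [1,1,3]) then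
        let st := nums.items.foldl
          (fun (p : Option Int × List Int) it =>
            if it.2 == 3 then (some it.1, p.2) else (p.1, p.2 ++ [it.1])) (none, [])
        match st.1, PySem.List.max? st.2 (fun x => x), PySem.List.min? st.2 (fun x => x) with
        | some threeKind, some mx, some mn => [3, threeKind, mx, mn]
        | _, _, _ => []
      else
        let st := nums.items.foldl
          (fun (p : List Int × Option Int) it =>
            if it.2 == 2 then (p.1 ++ [it.1], p.2) else (p.1, some it.1)) ([], none)
        match PySem.List.max? st.1 (fun x => x), PySem.List.min? st.1 (fun x => x), st.2 with
        | some mx, some mn, some oneKind => [2, mx, mn, oneKind]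
        | _, _, _ => []
    else if lnns == 4 then
      let st := nums.items.foldl
        (fun (p : Option Int × List Int) it =>
          if it.2 == 2 then (some it.1, p.2) else (p.1, p.2 ++ [it.1])) (none, [])
      match st.1 with
      | some twoKind =>
        1 :: twoKind ::
          (PySem.List.slice? (PySem.List.sorted st.2 (fun x => x)) none none (-1)).getD []
      | none => []
    else
      match PySem.List.min? numset (fun x => x), PySem.List.max? numset (fun x => x) with
      | some mn, some mx =>
        let stdn := PySem.List.sorted numset (fun x => x)
        if stdn == PySem.List.pyRange mn (mx + 1) 1 then
          4 :: (PySem.List.slice? stdn none none (-1)).getD []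
        else
          0 :: (PySem.List.slice? stdn none none (-1)).getD []
      | _, _ => []

def hand_to_tup (hand : String) : List Int :=
  let cards := PySem.Chars.splitOn hand.toList [' ']
  match pvLoopA cards PySem.Dict.empty PySem.Dict.empty PySem.Set.empty with
  | none => []
  | some (nums, _ntos, suitset) => pvFinishA nums suitset

-- ===== PORT B =====
-- RANK_ORDER = list('..23456789TJQKA')
def pvRankOrder : List Char := "..23456789TJQKA".toList

-- Source B's _groups: run-count groups in first-occurrence order
def pvGroups : List Int → List (Int × Int)
  | [] => []
  | r :: t =>
    let same := (r :: t).filter (fun x => x == r)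
    let rest := (r :: t).filter (fun x => !(x == r))
    (r, (same.length : Int)) :: pvGroups rest
termination_by l => l.length
decreasing_by
  simp only [List.filter_cons, beq_self_eq_true, Bool.not_true, List.length_cons]
  have := List.length_filter_le (fun x => !(x == r)) t
  simp only [Bool.false_eq_true, if_false]
  omega

-- everything after Source B has split, ranked, sorted and grouped; [] marks Source B's ValueError
def pvFinishB (groups : List (Int × Int)) (isFlush : Bool) : List Int :=
  let distinct := groups.map (·.1)
  if isFlush then
    if distinct == [14,13,12,11,10] then [9]
    else if decide (distinct.length = 5) &&
        (PySem.List.pyGetD distinct 0 0 - PySem.List.pyGetD distinct 4 0 == 4) then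
      [8, PySem.List.pyGetD distinct 0 0]
    else 5 :: distinct
  else
    let gs := PySem.List.sorted groups (fun g => g.2 * 15 + g.1) true
    let counts := gs.map (·.2)
    if counts == [1,1,1,1,1] then
      if PySem.List.pyGetD distinct 0 0 - PySem.List.pyGetD distinct 4 0 == 4 then 4 :: distinct
      else 0 :: distinct
    else
      let ranksOut := gs.map (·.1)
      if counts == [4,1] then 7 :: ranksOut
      else if counts == [3,2] then 6 :: ranksOut
      else if counts == [3,1,1] then 3 :: ranksOut
      else if counts == [2,2,1] then 2 :: ranksOut
      else if counts == [2,1,1,1] then 1 :: ranksOut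
      else []

def hand_to_tup_alt (hand : String) : List Int :=
  let cards := PySem.Chars.splitOn hand.toList [' ']
  match cards.mapM (fun c => (PySem.List.pyGet? c 0).bind
      (fun ch => (PySem.List.index? pvRankOrder ch).map (fun n => (n : Int)))) with
  | none => []
  | some ranksRaw =>
    match cards.mapM (fun c => PySem.List.pyGet? c 1) with
    | none => []
    | some suits =>
      let ranks := PySem.List.sorted ranksRaw (fun x => x) true
      pvFinishB (pvGroups ranks) (suits.all (fun s => s == suits.headD ' '))

-- ===== PRECONDITION & SPEC =====
def pvCards (hand : String) : List (List Char) := PySem.Chars.splitOn hand.toList [' ']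
def pvRankChars : List Char := ['2','3','4','5','6','7','8','9','T','J','Q','K','A']

-- Pre_ admits well-formed hands: single-space-separated cards, each at least two characters
-- starting with a valid rank character, that are either all of one suit (any number of cards;
-- A's flush path returns for these) or a five-card hand whose ranks are not all equal.
-- Elsewhere A raises (KeyError/IndexError, or NameError when the rank-count multiset fits none
-- of its per-branch assignment loops), or — on non-flush hands that are not five cards, or are
-- five cards of a single rank (impossible with real cards) — returns a label that is an
-- accident of its count-of-distinct-ranks dispatch.
def Pre_hand_to_tup (hand : String) : Prop :=
  1 ≤ (pvCards hand).length ∧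
  (∀ c ∈ pvCards hand, 2 ≤ c.length ∧ c.headD ' ' ∈ pvRankChars) ∧
  ((∀ c ∈ pvCards hand, c.tail.headD ' ' = ((pvCards hand).headD []).tail.headD ' ') ∨
   ((pvCards hand).length = 5 ∧
    ∃ c ∈ pvCards hand, c.headD ' ' ≠ ((pvCards hand).headD []).headD ' '))

instance (hand : String) : Decidable (Pre_hand_to_tup hand) := by
  unfold Pre_hand_to_tup; infer_instance

def pvWitness_hand_to_tup : String := "AH KD QS JC 2H"

def Spec_hand_to_tup (hand : String) (out : List Int) : Prop := out = hand_to_tup_alt hand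
instance (hand : String) (out : List Int) : Decidable (Spec_hand_to_tup hand out) := by
  unfold Spec_hand_to_tup; infer_instance

-- ===== CLAIM (what is proved, stated in full; the proofs are below) =====
def Claim_equal_hand_to_tup : Prop :=
  ∀ (hand : String), Dom_hand_to_tup hand → Pre_hand_to_tup hand →
    Spec_hand_to_tup hand (hand_to_tup hand)

-- ===== LEMMAS AND PROOFS =====

lemma pv_set_two_le {α : Type} [BEq α] [LawfulBEq α] {xs : List α} {a b : α}
    (ha : a ∈ xs) (hb : b ∈ xs) (hab : a ≠ b) :
    2 ≤ (PySem.Set.ofList xs).length := by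
  have ha' : a ∈ PySem.Set.ofList xs := (PySem.Set.mem_ofList _ _).2 ha
  have hb' : b ∈ PySem.Set.ofList xs := (PySem.Set.mem_ofList _ _).2 hb
  rcases h : PySem.Set.ofList xs with _ | ⟨x, _ | ⟨y, t⟩⟩
  · rw [h] at ha'; simp at ha'
  · rw [h] at ha' hb'
    simp at ha' hb'; exact absurd (ha'.trans hb'.symm) hab
  · simp

lemma pv_max?_eq {K : List Int} {x : Int} (hx : x ∈ K) (hmax : ∀ y ∈ K, y ≤ x) :
    PySem.List.max? K (fun z => z) = some x := by
  rcases h : PySem.List.max? K (fun z => z) with _ | m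
  · rw [PySem.List.max?_eq_none_iff] at h; subst h; simp at hx
  · have h1 : m ≤ x := hmax m (PySem.List.max?_mem h)
    have h2 : x ≤ m := PySem.List.max?_isMax h x hx
    rw [le_antisymm h1 h2]

lemma pv_min?_eq {K : List Int} {x : Int} (hx : x ∈ K) (hmin : ∀ y ∈ K, x ≤ y) :
    PySem.List.min? K (fun z => z) = some x := by
  rcases h : PySem.List.min? K (fun z => z) with _ | m
  · rw [PySem.List.min?_eq_none_iff] at h; subst h; simp at hx
  · have h1 : x ≤ m := hmin m (PySem.List.min?_mem h)
    have h2 : m ≤ x := PySem.List.min?_isMin h x hx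
    rw [le_antisymm h2 h1]

lemma pv_sorted_pairwise_lt (K : List Int) (hnd : K.Nodup) :
    (PySem.List.sorted K (fun x => x)).Pairwise (· < ·) := by
  have hle := PySem.List.sorted_pairwise K (fun x => x)
  have hne : (PySem.List.sorted K (fun x => x)).Nodup :=
    (PySem.List.sorted_perm K (fun x => x) false).nodup_iff.2 hnd
  exact (hle.and hne).imp (fun h => lt_of_le_of_ne h.1 h.2)

lemma pv_sorted_rev (K : List Int) (hnd : K.Nodup) :
    PySem.List.sorted K (fun x => x) true = (PySem.List.sorted K (fun x => x)).reverse := by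
  apply PySem.List.sorted_rev_eq_of_perm_of_pairwise_gt
  · exact (PySem.List.sorted K (fun x => x)).reverse_perm.trans
      (PySem.List.sorted_perm K (fun x => x) false)
  · exact List.pairwise_reverse.2 (pv_sorted_pairwise_lt K hnd)

lemma pv_sorted5 (K : List Int) (hnd : K.Nodup) (h5 : K.length = 5) :
    ∃ a b c d e : Int, PySem.List.sorted K (fun x => x) = [a, b, c, d, e] ∧
      a < b ∧ b < c ∧ c < d ∧ d < e ∧
      PySem.List.min? K (fun z => z) = some a ∧ PySem.List.max? K (fun z => z) = some e := by
  have hperm := PySem.List.sorted_perm K (fun x => x) false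
  have hlt := pv_sorted_pairwise_lt K hnd
  have hlen : (PySem.List.sorted K (fun x => x)).length = 5 := by
    rw [PySem.List.length_sorted]; exact h5
  rcases hS : PySem.List.sorted K (fun x => x) with _ | ⟨a, _ | ⟨b, _ | ⟨c, _ | ⟨d, _ | ⟨e, t⟩⟩⟩⟩⟩ <;>
    rw [hS] at hlen <;> simp at hlen
  rw [hS] at hperm hlt
  subst hlen
  simp [List.pairwise_cons] at hlt
  obtain ⟨⟨hab, hac, had, hae⟩, ⟨hbc, hbd, hbe⟩, ⟨hcd, hce⟩, hde⟩ := hlt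
  refine ⟨a, b, c, d, e, rfl, hab, hbc, hcd, hde, ?_, ?_⟩
  · apply pv_min?_eq (hperm.mem_iff.1 (by simp))
    intro y hy
    have : y ∈ [a, b, c, d, e] := hperm.mem_iff.2 hy
    simp at this
    rcases this with h | h | h | h | h <;> omega
  · apply pv_max?_eq (hperm.mem_iff.1 (by simp))
    intro y hy
    have : y ∈ [a, b, c, d, e] := hperm.mem_iff.2 hy
    simp at this
    rcases this with h | h | h | h | h <;> omega

lemma pv_royal_iff (K : List Int) (hnd : K.Nodup) :
    (PySem.Set.equal K (PySem.Set.ofList [10, 11, 12, 13, 14]) = true) ↔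
      PySem.List.sorted K (fun x => x) = [10, 11, 12, 13, 14] := by
  constructor
  · intro h
    have hmem := (PySem.Set.equal_iff _ _).1 h
    apply PySem.List.sorted_eq_of_perm_of_pairwise_lt
    · refine (List.perm_ext_iff_of_nodup (by decide) hnd).2 fun x => ?_
      rw [hmem x, PySem.Set.mem_ofList]
    · decide
  · intro h
    refine (PySem.Set.equal_iff _ _).2 fun x => ?_
    rw [PySem.Set.mem_ofList, ← (PySem.List.sorted_perm K (fun x => x) false).mem_iff, h]

lemma pv_straight_iff {a b c d e : Int} (h1 : a < b) (h2 : b < c) (h3 : c < d) (h4 : d < e) :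
    (([a, b, c, d, e] : List Int) = PySem.List.pyRange a (e + 1) 1) ↔ e - a = 4 := by
  constructor
  · intro h
    have hl := PySem.List.length_pyRange_one a (e + 1)
    rw [← h] at hl
    simp only [List.length_cons, List.length_nil] at hl
    omega
  · intro h
    rw [show e + 1 = a + 5 by omega]
    rw [PySem.List.pyRange_one_cons (by omega), PySem.List.pyRange_one_cons (by omega),
        PySem.List.pyRange_one_cons (by omega), PySem.List.pyRange_one_cons (by omega),
        PySem.List.pyRange_one_cons (by omega), PySem.List.pyRange_one_eq_nil (by omega)]
    simp only [List.cons.injEq, and_true, true_and]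
    omega

lemma pv_pair_facts {x y : Int} (h : x ≠ y) :
    ∃ lo hi : Int, PySem.List.sorted [x, y] (fun z => z) = [lo, hi] ∧ lo < hi ∧
      PySem.List.max? [x, y] (fun z => z) = some hi ∧
      PySem.List.min? [x, y] (fun z => z) = some lo ∧
      ([lo, hi] : List Int).Perm [x, y] := by
  rcases lt_or_gt_of_ne h with hlt | hlt
  · refine ⟨x, y, ?_, hlt, ?_, ?_, List.Perm.refl _⟩
    · exact PySem.List.sorted_eq_of_perm_of_pairwise_lt _ _ _ (List.Perm.refl _) (by simp [hlt])
    · exact pv_max?_eq (by simp) (by intro z hz; simp at hz; rcases hz with rfl | rfl <;> omega)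
    · exact pv_min?_eq (by simp) (by intro z hz; simp at hz; rcases hz with rfl | rfl <;> omega)
  · refine ⟨y, x, ?_, hlt, ?_, ?_, List.Perm.swap x y []⟩
    · exact PySem.List.sorted_eq_of_perm_of_pairwise_lt _ _ _ (List.Perm.swap x y []) (by simp [hlt])
    · exact pv_max?_eq (by simp) (by intro z hz; simp at hz; rcases hz with rfl | rfl <;> omega)
    · exact pv_min?_eq (by simp) (by intro z hz; simp at hz; rcases hz with rfl | rfl <;> omega)

lemma pv_triple_facts {x y z : Int} (hxy : x ≠ y) (hxz : x ≠ z) (hyz : y ≠ z) :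
    ∃ u v w : Int, PySem.List.sorted [x, y, z] (fun t => t) = [u, v, w] ∧ u < v ∧ v < w ∧
      ([u, v, w] : List Int).Perm [x, y, z] ∧ ([w, v, u] : List Int).Perm [x, y, z] := by
  have hnd : ([x, y, z] : List Int).Nodup := by simp [hxy, hxz, hyz]
  have hperm := PySem.List.sorted_perm ([x, y, z] : List Int) (fun t => t) false
  have hlt := pv_sorted_pairwise_lt [x, y, z] hnd
  have hlen : (PySem.List.sorted ([x, y, z] : List Int) (fun t => t)).length = 3 := by
    rw [PySem.List.length_sorted]; rfl
  rcases hS : PySem.List.sorted ([x, y, z] : List Int) (fun t => t) with _ | ⟨u, _ | ⟨v, _ | ⟨w, t⟩⟩⟩ <;>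
    rw [hS] at hlen <;> simp at hlen
  rw [hS] at hperm hlt
  subst hlen
  simp [List.pairwise_cons] at hlt
  refine ⟨u, v, w, rfl, hlt.1.1, hlt.2, hperm, List.Perm.trans ?_ hperm⟩
  simpa using List.reverse_perm ([u, v, w] : List Int)

lemma pv_sum_count (l : List Int) :
    ((PySem.Set.ofList l).map (fun k => List.count k l)).sum = l.length := by
  have hperm : (PySem.Set.ofList l).Perm l.dedup :=
    (List.perm_ext_iff_of_nodup (PySem.Set.nodup_ofList l) l.nodup_dedup).2
      (fun a => by rw [PySem.Set.mem_ofList, List.mem_dedup])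
  calc ((PySem.Set.ofList l).map (fun k => List.count k l)).sum
      = (l.dedup.map (fun k => List.count k l)).sum := (hperm.map _).sum_eq
    _ = l.length := List.sum_map_count_dedup_eq_length l

-- run-count groups: membership, nodup, counts, and descending order of the first components
lemma pvGroups_spec : ∀ (l : List Int),
    (∀ x, x ∈ (pvGroups l).map (·.1) ↔ x ∈ l) ∧
    ((pvGroups l).map (·.1)).Nodup ∧
    (∀ g ∈ pvGroups l, g.2 = (l.count g.1 : Int)) ∧
    (l.Pairwise (· ≥ ·) → ((pvGroups l).map (·.1)).Pairwise (· > ·)) := by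
  intro l
  induction l using pvGroups.induct with
  | case1 => simp [pvGroups]
  | case2 r t same ih =>
    rw [pvGroups]
    have hsub : List.Sublist (List.filter (fun x => !(x == r)) (r :: t)) (r :: t) := List.filter_sublist
    have hm_rest : ∀ x, x ∈ List.filter (fun x => !(x == r)) (r :: t) ↔ (x ∈ t ∧ x ≠ r) := by
      intro x; by_cases hx : x = r <;> simp [List.mem_filter, hx]
    refine ⟨?_, ?_, ?_, ?_⟩
    · intro x
      simp only [List.map_cons, List.mem_cons]
      rw [ih.1 x, hm_rest x]
      by_cases hx : x = r <;> simp [hx]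
    · simp only [List.map_cons, List.nodup_cons]
      refine ⟨?_, ih.2.1⟩
      rw [ih.1 r, hm_rest]
      simp
    · intro g hg
      rcases List.mem_cons.1 hg with rfl | hg
      · simp [List.count, List.countP_eq_length_filter]
      · have h1 := ih.2.2.1 g hg
        have hmem : g.1 ∈ List.filter (fun x => !(x == r)) (r :: t) :=
          (ih.1 g.1).1 (List.mem_map.2 ⟨g, hg, rfl⟩)
        have hne : g.1 ≠ r := ((hm_rest g.1).1 hmem).2
        rw [h1, List.count_filter (by simp [hne])]
    · intro hpw
      have hr := (List.pairwise_cons.1 hpw).1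
      simp only [List.map_cons, List.pairwise_cons]
      refine ⟨?_, ih.2.2.2 (hpw.sublist hsub)⟩
      intro x hx
      have hx' := (hm_rest x).1 ((ih.1 x).1 hx)
      exact lt_of_le_of_ne (hr x hx'.1) hx'.2

lemma pv_ofList_const {α : Type} [BEq α] [LawfulBEq α] (xs : List α) (s0 : α)
    (hne : xs ≠ []) (h : ∀ x ∈ xs, x = s0) : PySem.Set.ofList xs = [s0] := by
  rcases xs with _ | ⟨w, ws⟩
  · exact absurd rfl hne
  have hw : w = s0 := h w (by simp)
  have hnd := PySem.Set.nodup_ofList (w :: ws)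
  rcases hx : PySem.Set.ofList (w :: ws) with _ | ⟨a, t⟩
  · have : w ∈ PySem.Set.ofList (w :: ws) := (PySem.Set.mem_ofList _ _).2 (by simp)
    rw [hx] at this; simp at this
  have ha : a = s0 := h a ((PySem.Set.mem_ofList _ _).1 (by rw [hx]; simp))
  rcases t with _ | ⟨b, t'⟩
  · rw [ha]
  · have hb : b = s0 := h b ((PySem.Set.mem_ofList _ _).1 (by rw [hx]; simp))
    rw [hx] at hnd
    simp [ha, hb] at hnd

-- A's flush branch agrees with B's flush branch once B's distinct list is the
-- descending sort of the distinct ranks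
lemma pv_finish_eq_flush (dd : PySem.Dict Int Int) (suits : PySem.Set Char) (K : List Int)
    (G : List (Int × Int))
    (hkeys : dd.keys = K) (hnd : K.Nodup) (hne : K ≠ [])
    (hf : (PySem.Set.len suits == 1) = true)
    (hfst : G.map (·.1) = PySem.List.sorted K (fun x => x) true) :
    pvFinishA dd suits = pvFinishB G true := by
  have hset : PySem.Set.ofList K = K := PySem.Set.ofList_eq_self_of_nodup K hnd
  simp only [pvFinishA, pvFinishB, hkeys, hset, hf, if_true, hfst]
  by_cases hroyal : PySem.List.sorted K (fun x => x) = [10, 11, 12, 13, 14]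
  · have hA : PySem.Set.equal K (PySem.Set.ofList [10, 11, 12, 13, 14]) = true :=
      (pv_royal_iff K hnd).2 hroyal
    have hB : PySem.List.sorted K (fun x => x) true = [14, 13, 12, 11, 10] := by
      rw [pv_sorted_rev K hnd, hroyal]; rfl
    simp [hA, hB]
  · have hA : ¬ (PySem.Set.equal K (PySem.Set.ofList [10, 11, 12, 13, 14]) = true) :=
      fun h => hroyal ((pv_royal_iff K hnd).1 h)
    have hB : ¬ (PySem.List.sorted K (fun x => x) true = [14, 13, 12, 11, 10]) := by
      rw [pv_sorted_rev K hnd]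
      intro h
      exact hroyal (by rw [List.reverse_eq_iff.1 h]; rfl)
    by_cases hk5 : K.length = 5
    · obtain ⟨a, b, c, d, e, hS, hab, hbc, hcd, hde, hmn, hmx⟩ := pv_sorted5 K hnd hk5
      have hR : PySem.List.sorted K (fun x => x) true = [e, d, c, b, a] := by
        rw [pv_sorted_rev K hnd, hS]; rfl
      simp only [hA, hS, hR, hmn, hmx, PySem.Set.len, hk5,
        PySem.List.slice?_none_none_neg_one]
      have hB' : ¬(e = 14 ∧ d = 13 ∧ c = 12 ∧ b = 11 ∧ a = 10) := by
        rintro ⟨rfl, rfl, rfl, rfl, rfl⟩; exact hB hR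
      by_cases hst : e - a = 4
      · have hrange : ([a, b, c, d, e] : List Int) = PySem.List.pyRange a (e + 1) 1 :=
          (pv_straight_iff hab hbc hcd hde).2 hst
        simp [← hrange, hst, hB', PySem.List.pyGetD_ofNat']
      · have hrange : ¬ (([a, b, c, d, e] : List Int) = PySem.List.pyRange a (e + 1) 1) :=
          fun h => hst ((pv_straight_iff hab hbc hcd hde).1 h)
        simp [hrange, hst, hB', PySem.List.pyGetD_ofNat']
    · rcases hmx : PySem.List.max? K (fun z => z) with _ | mx
      · rw [PySem.List.max?_eq_none_iff] at hmx; subst hmx; exact absurd rfl hne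
      rcases hmn : PySem.List.min? K (fun z => z) with _ | mn
      · rw [PySem.List.min?_eq_none_iff] at hmn; subst hmn; exact absurd rfl hne
      have hc5 : ((K.length : Int) == 5) = false := by
        simp; exact_mod_cast hk5
      simp [hA, PySem.Set.len, hc5,
        PySem.List.slice?_none_none_neg_one, pv_sorted_rev K hnd, hroyal, hk5]

-- A's non-flush dispatch agrees with B's sorted-groups dispatch (five cards,
-- at least two distinct ranks, ranks within 2..14)
lemma pv_finish_eq (dd : PySem.Dict Int Int) (suits : PySem.Set Char)
    (K D : List Int) (cnt : Int → Nat)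
    (hitems : dd.items = K.map (fun k => (k, (cnt k : Int))))
    (hf : (PySem.Set.len suits == 1) = false)
    (hnd : K.Nodup) (hDK : D.Perm K) (hpwD : D.Pairwise (· > ·))
    (h1 : ∀ k ∈ K, 1 ≤ cnt k) (hsum : (K.map cnt).sum = 5) (h2 : 2 ≤ K.length)
    (hbnd : ∀ k ∈ K, 2 ≤ k ∧ k ≤ 14) :
    pvFinishA dd suits = pvFinishB (D.map (fun r => (r, (cnt r : Int)))) false := by
  have hkeys : dd.keys = K := by
    simp [PySem.Dict.keys, hitems, Function.comp_def]
  have hvals : dd.values = K.map (fun k => (cnt k : Int)) := by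
    simp [PySem.Dict.values, hitems, Function.comp_def]
  have hset : PySem.Set.ofList K = K := PySem.Set.ofList_eq_self_of_nodup K hnd
  have hGp : (D.map (fun r => (r, (cnt r : Int)))).Perm
      (K.map (fun r => (r, (cnt r : Int)))) := hDK.map _
  have hlen5 : K.length ≤ 5 := by
    have hle : (K.map (fun _ => 1)).sum ≤ (K.map cnt).sum :=
      List.sum_le_sum (fun k hk => h1 k hk)
    have hone : (K.map (fun _ => (1:Nat))).sum = K.length := by
      simp [List.map_const']
    omega
  simp only [pvFinishA, pvFinishB, hkeys, hvals, hitems, hset, hf, Bool.false_eq_true,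
    if_false]
  rcases K with _ | ⟨k1, K2⟩
  · simp at h2
  rcases K2 with _ | ⟨k2, K3⟩
  · simp at h2
  rcases K3 with _ | ⟨k3, K4⟩
  · -- two distinct ranks
    simp only [List.map_cons, List.map_nil, List.sum_cons, List.sum_nil] at hsum
    have hk12 : k1 ≠ k2 := by simp [List.nodup_cons] at hnd; exact hnd
    obtain ⟨hb1l, hb1r⟩ := hbnd k1 (by simp)
    obtain ⟨hb2l, hb2r⟩ := hbnd k2 (by simp)
    have hc1 : 1 ≤ cnt k1 := h1 k1 (by simp)
    have hc2 : 1 ≤ cnt k2 := h1 k2 (by simp)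
    have hd : (cnt k1 = 1 ∧ cnt k2 = 4) ∨ (cnt k1 = 4 ∧ cnt k2 = 1) ∨
        (cnt k1 = 2 ∧ cnt k2 = 3) ∨ (cnt k1 = 3 ∧ cnt k2 = 2) := by omega
    have hKf : ∀ c1 c2 : Nat, cnt k1 = c1 → cnt k2 = c2 →
        ([k1, k2].map (fun r => (r, (cnt r : Int))) : List (Int × Int)) =
          [(k1, (c1 : Int)), (k2, (c2 : Int))] := by
      intro c1 c2 e1 e2; simp [e1, e2]
    simp only [List.map_cons, List.map_nil]
    rcases hd with ⟨e1, e2⟩ | ⟨e1, e2⟩ | ⟨e1, e2⟩ | ⟨e1, e2⟩ <;> rw [e1, e2]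
    · -- (1,4): quads on k2
      have hgs : PySem.List.sorted (D.map (fun r => (r, (cnt r : Int))))
          (fun g => g.2 * 15 + g.1) true = [(k2, 4), (k1, 1)] := by
        apply PySem.List.sorted_rev_eq_of_perm_of_pairwise_gt
        · refine List.Perm.trans ?_ hGp.symm
          rw [hKf 1 4 e1 e2]
          exact (List.Perm.swap _ _ _).symm
        · simp [List.pairwise_cons]; omega
      simp [hgs, PySem.Set.len, List.foldl,
        (by decide : (PySem.Set.ofList [(1:Int), 4]).equal (PySem.Set.ofList [1, 4]) = true)]
    · -- (4,1): quads on k1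
      have hgs : PySem.List.sorted (D.map (fun r => (r, (cnt r : Int))))
          (fun g => g.2 * 15 + g.1) true = [(k1, 4), (k2, 1)] := by
        apply PySem.List.sorted_rev_eq_of_perm_of_pairwise_gt
        · refine List.Perm.trans ?_ hGp.symm
          rw [hKf 4 1 e1 e2]
          exact List.Perm.refl _
        · simp [List.pairwise_cons]; omega
      simp [hgs, PySem.Set.len, List.foldl,
        (by decide : (PySem.Set.ofList [(4:Int), 1]).equal (PySem.Set.ofList [1, 4]) = true)]
    · -- (2,3): full house, trips on k2
      have hgs : PySem.List.sorted (D.map (fun r => (r, (cnt r : Int))))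
          (fun g => g.2 * 15 + g.1) true = [(k2, 3), (k1, 2)] := by
        apply PySem.List.sorted_rev_eq_of_perm_of_pairwise_gt
        · refine List.Perm.trans ?_ hGp.symm
          rw [hKf 2 3 e1 e2]
          exact (List.Perm.swap _ _ _).symm
        · simp [List.pairwise_cons]; omega
      simp [hgs, PySem.Set.len, List.foldl,
        (by decide : (PySem.Set.ofList [(2:Int), 3]).equal (PySem.Set.ofList [1, 4]) = false)]
    · -- (3,2): full house, trips on k1
      have hgs : PySem.List.sorted (D.map (fun r => (r, (cnt r : Int))))
          (fun g => g.2 * 15 + g.1) true = [(k1, 3), (k2, 2)] := by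
        apply PySem.List.sorted_rev_eq_of_perm_of_pairwise_gt
        · refine List.Perm.trans ?_ hGp.symm
          rw [hKf 3 2 e1 e2]
          exact List.Perm.refl _
        · simp [List.pairwise_cons]; omega
      simp [hgs, PySem.Set.len, List.foldl,
        (by decide : (PySem.Set.ofList [(3:Int), 2]).equal (PySem.Set.ofList [1, 4]) = false)]
  rcases K4 with _ | ⟨k4, K5⟩
  · -- three distinct ranks
    simp only [List.map_cons, List.map_nil, List.sum_cons, List.sum_nil] at hsum
    have h12 : k1 ≠ k2 := fun h => by subst h; simp at hnd
    have h13 : k1 ≠ k3 := fun h => by subst h; simp at hnd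
    have h23 : k2 ≠ k3 := fun h => by subst h; simp at hnd
    obtain ⟨hb1l, hb1r⟩ := hbnd k1 (by simp)
    obtain ⟨hb2l, hb2r⟩ := hbnd k2 (by simp)
    obtain ⟨hb3l, hb3r⟩ := hbnd k3 (by simp)
    have hc1 : 1 ≤ cnt k1 := h1 k1 (by simp)
    have hc2 : 1 ≤ cnt k2 := h1 k2 (by simp)
    have hc3 : 1 ≤ cnt k3 := h1 k3 (by simp)
    have hd : (cnt k1 = 3 ∧ cnt k2 = 1 ∧ cnt k3 = 1) ∨ (cnt k1 = 1 ∧ cnt k2 = 3 ∧ cnt k3 = 1) ∨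
        (cnt k1 = 1 ∧ cnt k2 = 1 ∧ cnt k3 = 3) ∨ (cnt k1 = 1 ∧ cnt k2 = 2 ∧ cnt k3 = 2) ∨
        (cnt k1 = 2 ∧ cnt k2 = 1 ∧ cnt k3 = 2) ∨ (cnt k1 = 2 ∧ cnt k2 = 2 ∧ cnt k3 = 1) := by
      omega
    have hKf : ∀ c1 c2 c3 : Nat, cnt k1 = c1 → cnt k2 = c2 → cnt k3 = c3 →
        ([k1, k2, k3].map (fun r => (r, (cnt r : Int))) : List (Int × Int)) =
          [(k1, (c1 : Int)), (k2, (c2 : Int)), (k3, (c3 : Int))] := by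
      intro c1 c2 c3 e1 e2 e3; simp [e1, e2, e3]
    simp only [List.map_cons, List.map_nil]
    rcases hd with ⟨e1, e2, e3⟩ | ⟨e1, e2, e3⟩ | ⟨e1, e2, e3⟩ | ⟨e1, e2, e3⟩ |
      ⟨e1, e2, e3⟩ | ⟨e1, e2, e3⟩
    · -- (3,1,1)
      obtain ⟨lo, hi, hs, hlh, hmx, hmn, hpl⟩ := pv_pair_facts h23
      have hhib : 2 ≤ hi ∧ hi ≤ 14 := by
        have : hi ∈ ([k2, k3] : List Int) := hpl.subset (by simp)
        simp at this; rcases this with rfl | rfl <;> constructor <;> omega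
      have hlob : 2 ≤ lo ∧ lo ≤ 14 := by
        have : lo ∈ ([k2, k3] : List Int) := hpl.subset (by simp)
        simp at this; rcases this with rfl | rfl <;> constructor <;> omega
      have hgs : PySem.List.sorted (D.map (fun r => (r, (cnt r : Int))))
          (fun g => g.2 * 15 + g.1) true = [(k1, 3), (hi, 1), (lo, 1)] := by
        apply PySem.List.sorted_rev_eq_of_perm_of_pairwise_gt
        · refine List.Perm.trans ?_ hGp.symm
          rw [hKf 3 1 1 e1 e2 e3]
          exact List.Perm.cons _
            ((List.Perm.swap _ _ _).trans (hpl.map (fun r => (r, (1 : Int)))))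
        · simp [List.pairwise_cons]; omega
      rw [e1, e2, e3]
      simp [hgs, PySem.Set.len, List.foldl, hmx, hmn,
        (by decide : (PySem.Set.ofList [(3:Int), 1, 1]).equal (PySem.Set.ofList [1, 1, 3]) = true)]
    · -- (1,3,1)
      obtain ⟨lo, hi, hs, hlh, hmx, hmn, hpl⟩ := pv_pair_facts h13
      have hhib : 2 ≤ hi ∧ hi ≤ 14 := by
        have : hi ∈ ([k1, k3] : List Int) := hpl.subset (by simp)
        simp at this; rcases this with rfl | rfl <;> constructor <;> omega
      have hlob : 2 ≤ lo ∧ lo ≤ 14 := by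
        have : lo ∈ ([k1, k3] : List Int) := hpl.subset (by simp)
        simp at this; rcases this with rfl | rfl <;> constructor <;> omega
      have hgs : PySem.List.sorted (D.map (fun r => (r, (cnt r : Int))))
          (fun g => g.2 * 15 + g.1) true = [(k2, 3), (hi, 1), (lo, 1)] := by
        apply PySem.List.sorted_rev_eq_of_perm_of_pairwise_gt
        · refine List.Perm.trans ?_ hGp.symm
          rw [hKf 1 3 1 e1 e2 e3]
          refine List.Perm.trans (List.Perm.cons _
            ((List.Perm.swap _ _ _).trans (hpl.map (fun r => (r, (1 : Int)))))) ?_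
          exact (List.perm_middle (a := (k2, 3)) (l₁ := [(k1, 1)]) (l₂ := [(k3, 1)])).symm
        · simp [List.pairwise_cons]; omega
      rw [e1, e2, e3]
      simp [hgs, PySem.Set.len, List.foldl, hmx, hmn,
        (by decide : (PySem.Set.ofList [(1:Int), 3, 1]).equal (PySem.Set.ofList [1, 1, 3]) = true)]
    · -- (1,1,3)
      obtain ⟨lo, hi, hs, hlh, hmx, hmn, hpl⟩ := pv_pair_facts h12
      have hhib : 2 ≤ hi ∧ hi ≤ 14 := by
        have : hi ∈ ([k1, k2] : List Int) := hpl.subset (by simp)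
        simp at this; rcases this with rfl | rfl <;> constructor <;> omega
      have hlob : 2 ≤ lo ∧ lo ≤ 14 := by
        have : lo ∈ ([k1, k2] : List Int) := hpl.subset (by simp)
        simp at this; rcases this with rfl | rfl <;> constructor <;> omega
      have hgs : PySem.List.sorted (D.map (fun r => (r, (cnt r : Int))))
          (fun g => g.2 * 15 + g.1) true = [(k3, 3), (hi, 1), (lo, 1)] := by
        apply PySem.List.sorted_rev_eq_of_perm_of_pairwise_gt
        · refine List.Perm.trans ?_ hGp.symm
          rw [hKf 1 1 3 e1 e2 e3]
          refine List.Perm.trans (List.Perm.cons _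
            ((List.Perm.swap _ _ _).trans (hpl.map (fun r => (r, (1 : Int)))))) ?_
          exact (List.perm_middle (a := (k3, 3)) (l₁ := [(k1, 1), (k2, 1)]) (l₂ := [])).symm
        · simp [List.pairwise_cons]; omega
      rw [e1, e2, e3]
      simp [hgs, PySem.Set.len, List.foldl, hmx, hmn,
        (by decide : (PySem.Set.ofList [(1:Int), 1, 3]).equal (PySem.Set.ofList [1, 1, 3]) = true)]
    · -- (1,2,2)
      obtain ⟨lo, hi, hs, hlh, hmx, hmn, hpl⟩ := pv_pair_facts h23
      have hhib : 2 ≤ hi ∧ hi ≤ 14 := by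
        have : hi ∈ ([k2, k3] : List Int) := hpl.subset (by simp)
        simp at this; rcases this with rfl | rfl <;> constructor <;> omega
      have hlob : 2 ≤ lo ∧ lo ≤ 14 := by
        have : lo ∈ ([k2, k3] : List Int) := hpl.subset (by simp)
        simp at this; rcases this with rfl | rfl <;> constructor <;> omega
      have hgs : PySem.List.sorted (D.map (fun r => (r, (cnt r : Int))))
          (fun g => g.2 * 15 + g.1) true = [(hi, 2), (lo, 2), (k1, 1)] := by
        apply PySem.List.sorted_rev_eq_of_perm_of_pairwise_gt
        · refine List.Perm.trans ?_ hGp.symm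
          rw [hKf 1 2 2 e1 e2 e3]
          refine List.Perm.trans
            (List.Perm.append_right [(k1, 1)]
              ((List.Perm.swap _ _ _).trans (hpl.map (fun r => (r, (2 : Int)))))) ?_
          exact List.perm_append_comm
        · simp [List.pairwise_cons]; omega
      rw [e1, e2, e3]
      simp [hgs, PySem.Set.len, List.foldl, hmx, hmn,
        (by decide : (PySem.Set.ofList [(1:Int), 2, 2]).equal (PySem.Set.ofList [1, 1, 3]) = false)]
    · -- (2,1,2)
      obtain ⟨lo, hi, hs, hlh, hmx, hmn, hpl⟩ := pv_pair_facts h13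
      have hhib : 2 ≤ hi ∧ hi ≤ 14 := by
        have : hi ∈ ([k1, k3] : List Int) := hpl.subset (by simp)
        simp at this; rcases this with rfl | rfl <;> constructor <;> omega
      have hlob : 2 ≤ lo ∧ lo ≤ 14 := by
        have : lo ∈ ([k1, k3] : List Int) := hpl.subset (by simp)
        simp at this; rcases this with rfl | rfl <;> constructor <;> omega
      have hgs : PySem.List.sorted (D.map (fun r => (r, (cnt r : Int))))
          (fun g => g.2 * 15 + g.1) true = [(hi, 2), (lo, 2), (k2, 1)] := by
        apply PySem.List.sorted_rev_eq_of_perm_of_pairwise_gt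
        · refine List.Perm.trans ?_ hGp.symm
          rw [hKf 2 1 2 e1 e2 e3]
          refine List.Perm.trans
            (List.Perm.append_right [(k2, 1)]
              ((List.Perm.swap _ _ _).trans (hpl.map (fun r => (r, (2 : Int)))))) ?_
          exact List.Perm.cons _ (List.Perm.swap _ _ _)
        · simp [List.pairwise_cons]; omega
      rw [e1, e2, e3]
      simp [hgs, PySem.Set.len, List.foldl, hmx, hmn,
        (by decide : (PySem.Set.ofList [(2:Int), 1, 2]).equal (PySem.Set.ofList [1, 1, 3]) = false)]
    · -- (2,2,1)
      obtain ⟨lo, hi, hs, hlh, hmx, hmn, hpl⟩ := pv_pair_facts h12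
      have hhib : 2 ≤ hi ∧ hi ≤ 14 := by
        have : hi ∈ ([k1, k2] : List Int) := hpl.subset (by simp)
        simp at this; rcases this with rfl | rfl <;> constructor <;> omega
      have hlob : 2 ≤ lo ∧ lo ≤ 14 := by
        have : lo ∈ ([k1, k2] : List Int) := hpl.subset (by simp)
        simp at this; rcases this with rfl | rfl <;> constructor <;> omega
      have hgs : PySem.List.sorted (D.map (fun r => (r, (cnt r : Int))))
          (fun g => g.2 * 15 + g.1) true = [(hi, 2), (lo, 2), (k3, 1)] := by
        apply PySem.List.sorted_rev_eq_of_perm_of_pairwise_gt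
        · refine List.Perm.trans ?_ hGp.symm
          rw [hKf 2 2 1 e1 e2 e3]
          exact List.Perm.append_right [(k3, 1)]
            ((List.Perm.swap _ _ _).trans (hpl.map (fun r => (r, (2 : Int)))))
        · simp [List.pairwise_cons]; omega
      rw [e1, e2, e3]
      simp [hgs, PySem.Set.len, List.foldl, hmx, hmn,
        (by decide : (PySem.Set.ofList [(2:Int), 2, 1]).equal (PySem.Set.ofList [1, 1, 3]) = false)]
  rcases K5 with _ | ⟨k5, K6⟩
  · -- four distinct ranks: one pair plus three kickers
    simp only [List.map_cons, List.map_nil, List.sum_cons, List.sum_nil] at hsum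
    have h12 : k1 ≠ k2 := fun h => by subst h; simp at hnd
    have h13 : k1 ≠ k3 := fun h => by subst h; simp at hnd
    have h14 : k1 ≠ k4 := fun h => by subst h; simp at hnd
    have h23 : k2 ≠ k3 := fun h => by subst h; simp at hnd
    have h24 : k2 ≠ k4 := fun h => by subst h; simp at hnd
    have h34 : k3 ≠ k4 := fun h => by subst h; simp at hnd
    obtain ⟨hb1l, hb1r⟩ := hbnd k1 (by simp)
    obtain ⟨hb2l, hb2r⟩ := hbnd k2 (by simp)
    obtain ⟨hb3l, hb3r⟩ := hbnd k3 (by simp)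
    obtain ⟨hb4l, hb4r⟩ := hbnd k4 (by simp)
    have hc1 : 1 ≤ cnt k1 := h1 k1 (by simp)
    have hc2 : 1 ≤ cnt k2 := h1 k2 (by simp)
    have hc3 : 1 ≤ cnt k3 := h1 k3 (by simp)
    have hc4 : 1 ≤ cnt k4 := h1 k4 (by simp)
    have hd : (cnt k1 = 2 ∧ cnt k2 = 1 ∧ cnt k3 = 1 ∧ cnt k4 = 1) ∨
        (cnt k1 = 1 ∧ cnt k2 = 2 ∧ cnt k3 = 1 ∧ cnt k4 = 1) ∨
        (cnt k1 = 1 ∧ cnt k2 = 1 ∧ cnt k3 = 2 ∧ cnt k4 = 1) ∨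
        (cnt k1 = 1 ∧ cnt k2 = 1 ∧ cnt k3 = 1 ∧ cnt k4 = 2) := by omega
    have hKf : ∀ c1 c2 c3 c4 : Nat, cnt k1 = c1 → cnt k2 = c2 → cnt k3 = c3 → cnt k4 = c4 →
        ([k1, k2, k3, k4].map (fun r => (r, (cnt r : Int))) : List (Int × Int)) =
          [(k1, (c1 : Int)), (k2, (c2 : Int)), (k3, (c3 : Int)), (k4, (c4 : Int))] := by
      intro c1 c2 c3 c4 e1 e2 e3 e4; simp [e1, e2, e3, e4]
    simp only [List.map_cons, List.map_nil]
    rcases hd with ⟨e1, e2, e3, e4⟩ | ⟨e1, e2, e3, e4⟩ | ⟨e1, e2, e3, e4⟩ | ⟨e1, e2, e3, e4⟩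
    · -- pair on k1
      obtain ⟨u, v, w, hs3, huv, hvw, hp3, hp3r⟩ := pv_triple_facts h23 h24 h34
      have hwb : 2 ≤ w ∧ w ≤ 14 := by
        have : w ∈ ([k2, k3, k4] : List Int) := hp3.subset (by simp)
        simp at this; rcases this with rfl | rfl | rfl <;> constructor <;> omega
      have hgs : PySem.List.sorted (D.map (fun r => (r, (cnt r : Int))))
          (fun g => g.2 * 15 + g.1) true = [(k1, 2), (w, 1), (v, 1), (u, 1)] := by
        apply PySem.List.sorted_rev_eq_of_perm_of_pairwise_gt
        · refine List.Perm.trans ?_ hGp.symm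
          rw [hKf 2 1 1 1 e1 e2 e3 e4]
          exact List.Perm.cons _ (hp3r.map (fun r => (r, (1 : Int))))
        · simp [List.pairwise_cons]; omega
      rw [e1, e2, e3, e4]
      simp [hgs, PySem.Set.len, List.foldl, hs3, PySem.List.slice?_none_none_neg_one]
    · -- pair on k2
      obtain ⟨u, v, w, hs3, huv, hvw, hp3, hp3r⟩ := pv_triple_facts h13 h14 h34
      have hwb : 2 ≤ w ∧ w ≤ 14 := by
        have : w ∈ ([k1, k3, k4] : List Int) := hp3.subset (by simp)
        simp at this; rcases this with rfl | rfl | rfl <;> constructor <;> omega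
      have hgs : PySem.List.sorted (D.map (fun r => (r, (cnt r : Int))))
          (fun g => g.2 * 15 + g.1) true = [(k2, 2), (w, 1), (v, 1), (u, 1)] := by
        apply PySem.List.sorted_rev_eq_of_perm_of_pairwise_gt
        · refine List.Perm.trans ?_ hGp.symm
          rw [hKf 1 2 1 1 e1 e2 e3 e4]
          refine List.Perm.trans (List.Perm.cons _ (hp3r.map (fun r => (r, (1 : Int))))) ?_
          exact (List.perm_middle (a := (k2, 2)) (l₁ := [(k1, 1)]) (l₂ := [(k3, 1), (k4, 1)])).symm
        · simp [List.pairwise_cons]; omega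
      rw [e1, e2, e3, e4]
      simp [hgs, PySem.Set.len, List.foldl, hs3, PySem.List.slice?_none_none_neg_one]
    · -- pair on k3
      obtain ⟨u, v, w, hs3, huv, hvw, hp3, hp3r⟩ := pv_triple_facts h12 h14 h24
      have hwb : 2 ≤ w ∧ w ≤ 14 := by
        have : w ∈ ([k1, k2, k4] : List Int) := hp3.subset (by simp)
        simp at this; rcases this with rfl | rfl | rfl <;> constructor <;> omega
      have hgs : PySem.List.sorted (D.map (fun r => (r, (cnt r : Int))))
          (fun g => g.2 * 15 + g.1) true = [(k3, 2), (w, 1), (v, 1), (u, 1)] := by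
        apply PySem.List.sorted_rev_eq_of_perm_of_pairwise_gt
        · refine List.Perm.trans ?_ hGp.symm
          rw [hKf 1 1 2 1 e1 e2 e3 e4]
          refine List.Perm.trans (List.Perm.cons _ (hp3r.map (fun r => (r, (1 : Int))))) ?_
          exact (List.perm_middle (a := (k3, 2)) (l₁ := [(k1, 1), (k2, 1)]) (l₂ := [(k4, 1)])).symm
        · simp [List.pairwise_cons]; omega
      rw [e1, e2, e3, e4]
      simp [hgs, PySem.Set.len, List.foldl, hs3, PySem.List.slice?_none_none_neg_one]
    · -- pair on k4
      obtain ⟨u, v, w, hs3, huv, hvw, hp3, hp3r⟩ := pv_triple_facts h12 h13 h23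
      have hwb : 2 ≤ w ∧ w ≤ 14 := by
        have : w ∈ ([k1, k2, k3] : List Int) := hp3.subset (by simp)
        simp at this; rcases this with rfl | rfl | rfl <;> constructor <;> omega
      have hgs : PySem.List.sorted (D.map (fun r => (r, (cnt r : Int))))
          (fun g => g.2 * 15 + g.1) true = [(k4, 2), (w, 1), (v, 1), (u, 1)] := by
        apply PySem.List.sorted_rev_eq_of_perm_of_pairwise_gt
        · refine List.Perm.trans ?_ hGp.symm
          rw [hKf 1 1 1 2 e1 e2 e3 e4]
          refine List.Perm.trans (List.Perm.cons _ (hp3r.map (fun r => (r, (1 : Int))))) ?_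
          exact (List.perm_middle (a := (k4, 2)) (l₁ := [(k1, 1), (k2, 1), (k3, 1)]) (l₂ := [])).symm
        · simp [List.pairwise_cons]; omega
      rw [e1, e2, e3, e4]
      simp [hgs, PySem.Set.len, List.foldl, hs3, PySem.List.slice?_none_none_neg_one]
  · -- five distinct ranks
    have hrest : K6 = [] := by
      have h := hlen5; simp at h
      exact List.eq_nil_of_length_eq_zero (by omega)
    subst hrest
    simp only [List.map_cons, List.map_nil, List.sum_cons, List.sum_nil] at hsum
    have hc1 : 1 ≤ cnt k1 := h1 k1 (by simp)
    have hc2 : 1 ≤ cnt k2 := h1 k2 (by simp)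
    have hc3 : 1 ≤ cnt k3 := h1 k3 (by simp)
    have hc4 : 1 ≤ cnt k4 := h1 k4 (by simp)
    have hc5 : 1 ≤ cnt k5 := h1 k5 (by simp)
    have e1 : cnt k1 = 1 := by omega
    have e2 : cnt k2 = 1 := by omega
    have e3 : cnt k3 = 1 := by omega
    have e4 : cnt k4 = 1 := by omega
    have e5 : cnt k5 = 1 := by omega
    have hall1 : ∀ k ∈ ([k1, k2, k3, k4, k5] : List Int), cnt k = 1 := by
      intro k hk; simp at hk
      rcases hk with rfl | rfl | rfl | rfl | rfl <;> assumption
    obtain ⟨a, b, c, d, e, hS, hab, hbc, hcd, hde, hmn, hmx⟩ :=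
      pv_sorted5 _ hnd (by simp)
    have hDlit : D = [e, d, c, b, a] := by
      have hDs : PySem.List.sorted ([k1, k2, k3, k4, k5] : List Int) (fun x => x) true = D :=
        PySem.List.sorted_rev_eq_of_perm_of_pairwise_gt _ _ _ hDK hpwD
      rw [← hDs, pv_sorted_rev _ hnd, hS]; rfl
    have hGlit : D.map (fun r => (r, (cnt r : Int))) =
        [(e, 1), (d, 1), (c, 1), (b, 1), (a, 1)] := by
      rw [hDlit]
      have hmem : ∀ x ∈ ([e, d, c, b, a] : List Int), x ∈ ([k1, k2, k3, k4, k5] : List Int) := by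
        intro x hx
        have hp : ([e, d, c, b, a] : List Int).Perm [k1, k2, k3, k4, k5] := hDlit ▸ hDK
        exact hp.subset hx
      simp only [List.map_cons, List.map_nil]
      rw [hall1 e (hmem e (by simp)), hall1 d (hmem d (by simp)), hall1 c (hmem c (by simp)),
        hall1 b (hmem b (by simp)), hall1 a (hmem a (by simp))]
      norm_num
    have hgs : PySem.List.sorted ([(e, 1), (d, 1), (c, 1), (b, 1), (a, 1)] : List (Int × Int))
        (fun g => g.2 * 15 + g.1) true = [(e, 1), (d, 1), (c, 1), (b, 1), (a, 1)] := by
      apply PySem.List.sorted_rev_eq_self_of_pairwise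
      simp [List.pairwise_cons]; omega
    simp only [List.map_cons, List.map_nil]
    rw [e1, e2, e3, e4, e5]
    by_cases hst : e - a = 4
    · have hrange : ([a, b, c, d, e] : List Int) = PySem.List.pyRange a (e + 1) 1 :=
        (pv_straight_iff hab hbc hcd hde).2 hst
      simp [hgs, hGlit, PySem.Set.len, hS, hmn, hmx, ← hrange, hst,
        PySem.List.slice?_none_none_neg_one, PySem.List.pyGetD_ofNat']
    · have hrange : ¬ (([a, b, c, d, e] : List Int) = PySem.List.pyRange a (e + 1) 1) :=
        fun h => hst ((pv_straight_iff hab hbc hcd hde).1 h)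
      simp [hgs, hGlit, PySem.Set.len, hS, hmn, hmx, hrange, hst,
        PySem.List.slice?_none_none_neg_one, PySem.List.pyGetD_ofNat']

lemma pv_stoint_isSome : ∀ x ∈ pvRankChars, (pvStoint.get? x).isSome := by
  intro x hx; fin_cases hx <;> decide

lemma pv_stoint_inj :
    ∀ x ∈ pvRankChars, ∀ y ∈ pvRankChars, x ≠ y → pvStoint.get? x ≠ pvStoint.get? y := by
  intro x hx y hy; fin_cases hx <;> fin_cases hy <;> decide

-- Source B's RANK_ORDER.index agrees with A's stoint lookup on valid rank characters
lemma pv_index_rank : ∀ x ∈ pvRankChars,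
    (PySem.List.index? pvRankOrder x).map (fun n => (n : Int)) = pvStoint.get? x := by
  intro x hx; fin_cases hx <;> decide

lemma pv_rank_bounds : ∀ x ∈ pvRankChars,
    2 ≤ (pvStoint.get? x).getD 0 ∧ (pvStoint.get? x).getD 0 ≤ 14 := by
  intro x hx; fin_cases hx <;> decide

lemma pv_mapM_some {α β : Type} (f : α → Option β) (g : α → β) :
    ∀ (l : List α), (∀ c ∈ l, f c = some (g c)) → l.mapM f = some (l.map g) := by
  intro l h
  induction l with
  | nil => rfl
  | cons x xs ih =>
    simp only [List.mapM_cons, h x (by simp), ih (fun c hc => h c (by simp [hc]))]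
    rfl

lemma pvLoopA_eq (cards : List (List Char)) (rk : List Char → Int) (st : List Char → Char)
    (h : ∀ c ∈ cards, ∃ ch, PySem.List.pyGet? c 0 = some ch ∧
      pvStoint.get? ch = some (rk c) ∧ PySem.List.pyGet? c 1 = some (st c)) :
    ∀ (nums : PySem.Dict Int Int) (ntos : PySem.Dict Int (List Char)) (ss : PySem.Set Char),
    ∃ ntos', pvLoopA cards nums ntos ss =
      some ((cards.map rk).foldl (fun d r => d.modify r 0 (· + 1)) nums, ntos',
            (cards.map st).foldl PySem.Set.add ss) := by
  induction cards with
  | nil => exact fun nums ntos ss => ⟨ntos, rfl⟩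
  | cons c rest ih =>
    intro nums ntos ss
    obtain ⟨ch, hch, hget, hsuit⟩ := h c (by simp)
    have hrest : ∀ c' ∈ rest, ∃ ch, PySem.List.pyGet? c' 0 = some ch ∧
        pvStoint.get? ch = some (rk c') ∧ PySem.List.pyGet? c' 1 = some (st c') :=
      fun c' hc' => h c' (List.mem_cons_of_mem _ hc')
    simp only [pvLoopA, hch, hget, hsuit, List.map_cons, List.foldl_cons]
    by_cases hcont : nums.contains (rk c) = true
    · simp only [hcont, if_true]
      exact ih hrest _ _ _
    · simp only [hcont, if_false, Bool.false_eq_true]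
      have hins : nums.insert (rk c) 1 = nums.modify (rk c) 0 (· + 1) := by
        simp [PySem.Dict.modify,
          PySem.Dict.getD_of_not_contains nums 0 (Bool.not_eq_true _ ▸ hcont)]
      rw [hins]
      exact ih hrest _ _ _

-- ===== VERDICT (by name: the statement is the Claim_ definition above) =====
theorem hand_to_tup_spec : Claim_equal_hand_to_tup := by
  unfold Claim_equal_hand_to_tup Spec_hand_to_tup
  intro hand _ hpre
  obtain ⟨hne0, hvalid0, hdisj⟩ := hpre
  simp only [pvCards] at hne0 hvalid0 hdisj
  unfold hand_to_tup hand_to_tup_alt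
  generalize hcardseq : PySem.Chars.splitOn hand.toList [' '] = cards at *
  have hvalid : ∀ c ∈ cards, ∃ ch, PySem.List.pyGet? c 0 = some ch ∧ ch ∈ pvRankChars ∧
      pvStoint.get? ch = some ((pvStoint.get? (c.headD ' ')).getD 0) ∧
      PySem.List.pyGet? c 1 = some ((PySem.List.pyGet? c 1).getD ' ') := by
    intro c hc
    obtain ⟨hlen2, hmem⟩ := hvalid0 c hc
    rcases c with _ | ⟨x, c'⟩
    · simp at hlen2
    rcases c' with _ | ⟨y, t⟩
    · simp at hlen2
    have hx : x ∈ pvRankChars := by simpa using hmem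
    obtain ⟨v, hv⟩ := Option.isSome_iff_exists.1 (pv_stoint_isSome x hx)
    refine ⟨x, ?_, hx, ?_, ?_⟩
    · exact PySem.List.pyGet?_zero_cons _ _
    · simp [hv]
    · have h1 : PySem.List.pyGet? (x :: y :: t) 1 = some y := by
        rw [show (1 : Int) = ((1 : Nat) : Int) by norm_num, PySem.List.pyGet?_natCast]
        rfl
      simp only [h1, Option.getD_some]
  obtain ⟨ntos', hloop⟩ := pvLoopA_eq cards
    (fun c => (pvStoint.get? (c.headD ' ')).getD 0)
    (fun c => (PySem.List.pyGet? c 1).getD ' ')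
    (fun c hc => (hvalid c hc).imp (fun ch h => ⟨h.1, h.2.2.1, h.2.2.2⟩))
    PySem.Dict.empty PySem.Dict.empty PySem.Set.empty
  have hrB : cards.mapM (fun c => (PySem.List.pyGet? c 0).bind
      (fun ch => (PySem.List.index? pvRankOrder ch).map (fun n => (n : Int)))) =
      some (cards.map (fun c => (pvStoint.get? (c.headD ' ')).getD 0)) := by
    apply pv_mapM_some
    intro c hc
    obtain ⟨ch, h1', hmemc, h2', h3'⟩ := hvalid c hc
    rw [h1', Option.bind_some, pv_index_rank ch hmemc]
    exact h2'
  have hsB : cards.mapM (fun c => PySem.List.pyGet? c 1) =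
      some (cards.map (fun c => (PySem.List.pyGet? c 1).getD ' ')) := by
    apply pv_mapM_some
    intro c hc
    exact (hvalid c hc).choose_spec.2.2.2
  dsimp only []
  rw [hloop, hrB, hsB]
  set ranks := cards.map (fun c => (pvStoint.get? (c.headD ' ')).getD 0) with hranks
  set suitsL := cards.map (fun c => (PySem.List.pyGet? c 1).getD ' ') with hsuitsL
  have hsuitsSet : suitsL.foldl PySem.Set.add PySem.Set.empty = PySem.Set.ofList suitsL :=
    (PySem.Set.ofList_eq_foldl suitsL).symm
  dsimp only []
  rw [hsuitsSet]
  -- B's group facts over the descending rank sort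
  obtain ⟨hmemD, hnodD, hsndD, hpwDf⟩ :=
    pvGroups_spec (PySem.List.sorted ranks (fun x => x) true)
  have hpwD : ((pvGroups (PySem.List.sorted ranks (fun x => x) true)).map (·.1)).Pairwise
      (· > ·) := by
    refine hpwDf ?_
    exact (PySem.List.sorted_pairwise_rev ranks (fun x => x)).imp (fun h => h)
  have hDK : ((pvGroups (PySem.List.sorted ranks (fun x => x) true)).map (·.1)).Perm
      (PySem.Set.ofList ranks) := by
    refine (List.perm_ext_iff_of_nodup hnodD (PySem.Set.nodup_ofList _)).2 fun x => ?_
    rw [hmemD x, PySem.List.mem_sorted, PySem.Set.mem_ofList]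
  have hfstD : (pvGroups (PySem.List.sorted ranks (fun x => x) true)).map (·.1) =
      PySem.List.sorted (PySem.Set.ofList ranks) (fun x => x) true :=
    (PySem.List.sorted_rev_eq_of_perm_of_pairwise_gt _ _ _ hDK hpwD).symm
  have hstc : ∀ c ∈ cards, (PySem.List.pyGet? c 1).getD ' ' = c.tail.headD ' ' := by
    intro c hc
    obtain ⟨hlen2, _⟩ := hvalid0 c hc
    rcases c with _ | ⟨x, c'⟩
    · simp at hlen2
    rcases c' with _ | ⟨y, t⟩
    · simp at hlen2
    have h1 : PySem.List.pyGet? (x :: y :: t) 1 = some y := by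
      rw [show (1 : Int) = ((1 : Nat) : Int) by norm_num, PySem.List.pyGet?_natCast]
      rfl
    rw [h1]
    rfl
  have hcne : cards ≠ [] := by
    intro h; rw [h] at hne0; simp at hne0
  have hcfmem : cards.headD [] ∈ cards := by
    rcases cards with _ | ⟨cf, restc⟩
    · exact absurd rfl hcne
    · simp
  have hsne : suitsL ≠ [] := by
    simp only [hsuitsL, ne_eq, List.map_eq_nil_iff]
    exact hcne
  by_cases hall : suitsL.all (fun s => s == suitsL.headD ' ') = true
  · -- a single suit: both take the flush path
    have hs0 : PySem.Set.ofList suitsL = [suitsL.headD ' '] := by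
      refine pv_ofList_const _ _ hsne ?_
      intro u hu
      have := List.all_eq_true.1 hall u hu
      simpa using this
    have hflag : (PySem.Set.len (PySem.Set.ofList suitsL) == 1) = true := by
      rw [hs0]; rfl
    rw [hall]
    refine pv_finish_eq_flush _ _ (PySem.Set.ofList ranks) _
      (PySem.Dict.keys_counter ranks) (PySem.Set.nodup_ofList ranks) ?_ hflag hfstD
    intro hnil
    have : (pvStoint.get? ((cards.headD []).headD ' ')).getD 0 ∈ PySem.Set.ofList ranks :=
      (PySem.Set.mem_ofList _ _).2
        (by rw [hranks]; exact List.mem_map.2 ⟨cards.headD [], hcfmem, rfl⟩)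
    rw [hnil] at this
    simp at this
  · -- at least two suits: both take the non-flush dispatch
    have hhead : suitsL.headD ' ' = (cards.headD []).tail.headD ' ' := by
      rcases cards with _ | ⟨cf, restc⟩
      · exact absurd rfl hcne
      · simp only [hsuitsL, List.map_cons, List.headD_cons]
        exact hstc cf (by simp)
    have hflag : (PySem.Set.len (PySem.Set.ofList suitsL) == 1) = false := by
      simp only [List.all_eq_true, not_forall] at hall
      obtain ⟨u, hu, hune⟩ := hall
      have hune' : u ≠ suitsL.headD ' ' := by simpa using hune
      have hhd : suitsL.headD ' ' ∈ suitsL := by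
        rcases hsL : suitsL with _ | ⟨s0, st'⟩
        · exact absurd hsL hsne
        · simp
      have h2s := pv_set_two_le hu hhd hune'
      simp only [PySem.Set.len, beq_eq_false_iff_ne, ne_eq]
      intro hcontra
      omega
    -- Pre_'s first disjunct would force a single suit, so we are in the five-card case
    rcases hdisj with hsuit | ⟨hlen, c0, hc0mem, hc0ne⟩
    · exfalso
      apply hall
      refine List.all_eq_true.2 fun u hu => ?_
      rw [hsuitsL] at hu
      obtain ⟨c, hc, hcu⟩ := List.mem_map.1 hu
      rw [← hcu, hstc c hc, hsuit c hc, hhead]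
      simp
    · -- five cards with at least two distinct ranks
      have hlenR : ranks.length = 5 := by
        rw [hranks, List.length_map]; exact hlen
      obtain ⟨hl0, hm0⟩ := hvalid0 c0 hc0mem
      obtain ⟨hlf, hmf⟩ := hvalid0 (cards.headD []) hcfmem
      have hgetne : pvStoint.get? (c0.headD ' ') ≠
          pvStoint.get? ((cards.headD []).headD ' ') :=
        pv_stoint_inj _ hm0 _ hmf hc0ne
      obtain ⟨v0, hv0⟩ := Option.isSome_iff_exists.1 (pv_stoint_isSome _ hm0)
      obtain ⟨vf, hvf⟩ := Option.isSome_iff_exists.1 (pv_stoint_isSome _ hmf)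
      have h2K : 2 ≤ (PySem.Set.ofList ranks).length := by
        refine pv_set_two_le (a := v0) (b := vf) ?_ ?_ ?_
        · rw [hranks]
          exact List.mem_map.2 ⟨c0, hc0mem, by rw [hv0]; rfl⟩
        · rw [hranks]
          exact List.mem_map.2 ⟨cards.headD [], hcfmem, by rw [hvf]; rfl⟩
        · intro h
          exact hgetne (by rw [hv0, hvf, h])
      have hGr : pvGroups (PySem.List.sorted ranks (fun x => x) true) =
          ((pvGroups (PySem.List.sorted ranks (fun x => x) true)).map (·.1)).map
            (fun r => (r, ((ranks.count r : Nat) : Int))) := by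
        rw [List.map_map]
        conv_lhs => rw [← List.map_id
          (pvGroups (PySem.List.sorted ranks (fun x => x) true))]
        apply List.map_congr_left
        intro g hg
        have h2g := hsndD g hg
        have hcc : (PySem.List.sorted ranks (fun x => x) true).count g.1 = ranks.count g.1 :=
          (PySem.List.sorted_perm ranks (fun x => x) true).count_eq g.1
        cases g with
        | mk gx gy =>
          simp only [Function.comp_apply, id_eq]
          simp only at h2g
          rw [hcc] at h2g
          rw [h2g]
      have hallfalse : suitsL.all (fun s => s == suitsL.headD ' ') = false :=
        Bool.not_eq_true _ ▸ hall
      rw [hallfalse, hGr]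
      refine pv_finish_eq _ _ (PySem.Set.ofList ranks) _ (fun k => ranks.count k)
        (PySem.Dict.items_counter ranks) hflag (PySem.Set.nodup_ofList ranks) hDK hpwD
        ?_ ?_ h2K ?_
      · intro k hk
        exact List.count_pos_iff.2 ((PySem.Set.mem_ofList _ _).1 hk)
      · rw [pv_sum_count, hlenR]
      · intro k hk
        have hm : k ∈ ranks := (PySem.Set.mem_ofList _ _).1 hk
        rw [hranks] at hm
        obtain ⟨c, hc, hck⟩ := List.mem_map.1 hm
        have := pv_rank_bounds (c.headD ' ') (hvalid0 c hc).2
        rw [← hck]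
        exact this
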